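-- pv_equiv track=rewrite | github.com/Diana-Secarea/learning-to-rank-engine | data_cleaning.py | dedup_by_website
-- ===== SOURCE A (Python) =====
-- def count_fields(record: dict) -> int:
--     """Count non-null fields in a record."""
--     return sum(1 for v in record.values() if v is not None)
--
-- def dedup_by_website(records: list) -> list:
--     seen = {}
--     no_website = []
--     for r in records:
--         key = (r.get("website") or "").lower().strip()
--         if not key:
--             no_website.append(r)
--             continue
--         if key not in seen:
--             seen[key] = r
--         else:
--             if count_fields(r) > count_fields(seen[key]):
--                 seen[key] = r
--     return list(seen.values()) + no_website
-- ===== SOURCE B (Python) =====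
-- def count_fields(record: dict) -> int:
--     """Count non-null fields in a record."""
--     return sum(1 for v in record.values() if v is not None)
--
-- def dedup_by_website(records: list) -> list:
--     # Group records by normalised website key, then pick the most-populated
--     # record of each group in a separate reduce pass (max keeps the first
--     # maximal element, matching A's strictly-greater replacement rule).
--     groups = {}
--     no_website = []
--     for r in records:
--         key = (r.get("website") or "").lower().strip()
--         if not key:
--             no_website.append(r)
--         else:
--             groups.setdefault(key, []).append(r)
--     return [max(g, key=count_fields) for g in groups.values()] + no_website
-- ===== Notes on version B (the rewrite author's own statement) =====
-- stated objective: alternative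
-- what changed: B first groups all records into a dict of lists keyed by normalised website (collecting keyless records aside), then selects max(group, key=count_fields) per group in a second pass, instead of A's single pass maintaining one running best per key.
import Mathlib
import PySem

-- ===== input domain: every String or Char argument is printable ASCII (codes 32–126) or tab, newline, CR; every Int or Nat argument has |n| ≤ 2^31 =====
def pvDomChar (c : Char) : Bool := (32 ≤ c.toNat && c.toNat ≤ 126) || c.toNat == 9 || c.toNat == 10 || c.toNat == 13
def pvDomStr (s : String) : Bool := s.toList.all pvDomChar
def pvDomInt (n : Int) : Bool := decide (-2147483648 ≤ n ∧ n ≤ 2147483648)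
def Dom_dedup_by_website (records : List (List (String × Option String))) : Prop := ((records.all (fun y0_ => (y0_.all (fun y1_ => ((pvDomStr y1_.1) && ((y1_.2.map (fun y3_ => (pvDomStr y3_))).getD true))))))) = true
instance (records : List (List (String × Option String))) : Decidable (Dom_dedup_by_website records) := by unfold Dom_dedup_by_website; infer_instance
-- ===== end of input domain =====

-- B regroups the work: one pass builds a dict of per-website candidate lists, a second pass
-- picks the most-populated record per group (Python max keeps the first maximum, like A's
-- strictly-greater replacement); same return value, different decomposition (objective: alternative).

-- ===== PORT A =====
-- a record is a Python dict: build it from the association list exactly as dict(...) does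
def recDict (r : List (String × Option String)) : PySem.Dict String (Option String) :=
  PySem.Dict.ofList r

-- count_fields: sum(1 for v in record.values() if v is not None)
def countFields (r : List (String × Option String)) : Int :=
  (recDict r).values.foldl (fun acc v => if v.isSome then acc + 1 else acc) 0

-- key = (r.get("website") or "").lower().strip()
def keyOf (r : List (String × Option String)) : String :=
  PySem.Str.strip (PySem.Str.lower ((((recDict r).get? "website").getD none).getD ""))

-- one iteration of A's loop over (seen, no_website)
def dedupStepA
    (st : PySem.Dict String (List (String × Option String)) × List (List (String × Option String)))
    (r : List (String × Option String)) :
    PySem.Dict String (List (String × Option String)) × List (List (String × Option String)) :=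
  let key := keyOf r
  if key = "" then (st.1, st.2 ++ [r])
  else
    match st.1.get? key with
    | none => (st.1.insert key r, st.2)
    | some prev => if countFields r > countFields prev then (st.1.insert key r, st.2) else st

def dedup_by_website (records : List (List (String × Option String))) :
    List (List (String × Option String)) :=
  let st := records.foldl dedupStepA (PySem.Dict.empty, [])
  st.1.values ++ st.2

-- ===== PORT B =====
-- max(g, key=count_fields): first element, replaced only on strictly greater key (Python max; [] unreachable: every group is nonempty)
def pyMaxByCount (g : List (List (String × Option String))) : List (String × Option String) :=
  match g with
  | [] => []
  | h :: t => t.foldl (fun best x => if countFields x > countFields best then x else best) h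

-- one iteration of B's grouping loop over (groups, no_website); setdefault(key, []).append(r) = modify
def dedupStepB
    (st : PySem.Dict String (List (List (String × Option String))) × List (List (String × Option String)))
    (r : List (String × Option String)) :
    PySem.Dict String (List (List (String × Option String))) × List (List (String × Option String)) :=
  let key := keyOf r
  if key = "" then (st.1, st.2 ++ [r])
  else (st.1.modify key [] (· ++ [r]), st.2)

def dedup_by_website_alt (records : List (List (String × Option String))) :
    List (List (String × Option String)) :=
  let st := records.foldl dedupStepB (PySem.Dict.empty, [])
  st.1.values.map pyMaxByCount ++ st.2

-- ===== PRECONDITION & SPEC =====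
def Spec_dedup_by_website (records : List (List (String × Option String))) (out : List (List (String × Option String))) : Prop := out = dedup_by_website_alt records
instance (records : List (List (String × Option String))) (out : List (List (String × Option String))) : Decidable (Spec_dedup_by_website records out) := by unfold Spec_dedup_by_website; infer_instance

-- ===== CLAIM (what is proved, stated in full; the proofs are below) =====
def Claim_equal_dedup_by_website : Prop := ∀ (records : List (List (String × Option String))), Dom_dedup_by_website records → Spec_dedup_by_website records (dedup_by_website records)

-- ===== LEMMAS AND PROOFS =====

-- f sends a B-side group entry to the A-side chosen-record entry
def pvSel (p : String × List (List (String × Option String))) :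
    String × List (String × Option String) := (p.1, pyMaxByCount p.2)

lemma get?_mk_map (l : List (String × List (List (String × Option String)))) (k : String) :
    (PySem.Dict.mk (l.map pvSel)).get? k = ((PySem.Dict.mk l).get? k).map pyMaxByCount := by
  induction l with
  | nil => simp [PySem.Dict.get?]
  | cons a l ih =>
    obtain ⟨a1, a2⟩ := a
    by_cases h : (a1 == k) = true
    · simp [PySem.Dict.get?_mk_cons, pvSel, h]
    · simp [PySem.Dict.get?_mk_cons, pvSel, h, ih]

lemma keys_mk_map (g : PySem.Dict String (List (List (String × Option String)))) :
    (PySem.Dict.mk (g.items.map pvSel)).keys = g.keys := by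
  simp only [PySem.Dict.keys, List.map_map]
  rfl

lemma contains_mk_map (g : PySem.Dict String (List (List (String × Option String)))) (k : String) :
    (PySem.Dict.mk (g.items.map pvSel)).contains k = g.contains k := by
  simp only [PySem.Dict.contains_eq_decide_mem_keys]
  rw [keys_mk_map]

lemma insert_mk_map (g : PySem.Dict String (List (List (String × Option String))))
    (k : String) (v : List (List (String × Option String))) :
    (PySem.Dict.mk (g.items.map pvSel)).insert k (pyMaxByCount v)
      = PySem.Dict.mk ((g.insert k v).items.map pvSel) := by
  apply PySem.Dict.ext
  rw [PySem.Dict.items_insert, PySem.Dict.items_insert, contains_mk_map]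
  by_cases h : g.contains k = true
  · rw [if_pos h, if_pos h]
    show (g.items.map pvSel).map _ = (g.items.map _).map pvSel
    simp only [List.map_map]
    apply List.map_congr_left
    intro p _
    by_cases hp : p.1 = k <;> simp [pvSel, hp]
  · rw [if_neg h, if_neg h]
    show (g.items.map pvSel) ++ [(k, pyMaxByCount v)] = (g.items ++ [(k, v)]).map pvSel
    simp [pvSel]

lemma insert_mk_map_keep (g : PySem.Dict String (List (List (String × Option String))))
    (hnd : g.keys.Nodup)
    (k : String) (prev v : List (List (String × Option String)))
    (hget : g.get? k = some prev) (hsel : pyMaxByCount v = pyMaxByCount prev) :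
    PySem.Dict.mk (g.items.map pvSel) = PySem.Dict.mk ((g.insert k v).items.map pvSel) := by
  apply PySem.Dict.ext
  have hc : g.contains k = true := by
    rw [PySem.Dict.contains_eq_isSome_get?, hget]; rfl
  rw [PySem.Dict.items_insert, if_pos hc]
  show g.items.map pvSel = (g.items.map _).map pvSel
  simp only [List.map_map]
  apply List.map_congr_left
  intro p hp
  by_cases hpk : p.1 = k
  · have : p = (k, prev) := by
      have := PySem.Dict.get?_of_mem_items (d := g) (k := p.1) (v := p.2) (by simpa using hp) hnd
      rw [hpk, hget] at this
      obtain ⟨p1, p2⟩ := p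
      simp at this
      simp at hpk
      simp [hpk, this]
    subst this
    simp [pvSel, hpk, hsel]
  · simp [pvSel, hpk]

lemma pyMax_append (h : List (String × Option String)) (t : List (List (String × Option String)))
    (r : List (String × Option String)) :
    pyMaxByCount ((h :: t) ++ [r])
      = if countFields r > countFields (pyMaxByCount (h :: t)) then r else pyMaxByCount (h :: t) := by
  simp [pyMaxByCount, List.foldl_append]

-- main loop invariant: A's fold state is the image of B's fold state under pvSel
lemma fold_rel (records : List (List (String × Option String)))
    (g : PySem.Dict String (List (List (String × Option String))))
    (nw : List (List (String × Option String)))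
    (hnd : g.keys.Nodup) (hne : ∀ p ∈ g.items, p.2 ≠ []) :
    records.foldl dedupStepA (PySem.Dict.mk (g.items.map pvSel), nw)
      = (PySem.Dict.mk (((records.foldl dedupStepB (g, nw)).1).items.map pvSel),
         (records.foldl dedupStepB (g, nw)).2) := by
  induction records generalizing g nw with
  | nil => rfl
  | cons r rs ih =>
    simp only [List.foldl_cons]
    by_cases hk : keyOf r = ""
    · rw [show dedupStepA (PySem.Dict.mk (g.items.map pvSel), nw) r
            = (PySem.Dict.mk (g.items.map pvSel), nw ++ [r]) by simp [dedupStepA, hk],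
          show dedupStepB (g, nw) r = (g, nw ++ [r]) by simp [dedupStepB, hk]]
      exact ih g (nw ++ [r]) hnd hne
    · have hget := get?_mk_map g.items (keyOf r)
      cases hg : g.get? (keyOf r) with
      | none =>
        have hA : dedupStepA (PySem.Dict.mk (g.items.map pvSel), nw) r
            = ((PySem.Dict.mk (g.items.map pvSel)).insert (keyOf r) r, nw) := by
          simp only [dedupStepA]
          rw [if_neg hk]
          show (match (PySem.Dict.mk (g.items.map pvSel)).get? (keyOf r) with
                | none => _ | some prev => _) = _
          rw [hget, hg]
          rfl
        have hB : dedupStepB (g, nw) r = (g.insert (keyOf r) [r], nw) := by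
          simp only [dedupStepB]
          rw [if_neg hk]
          show (g.insert (keyOf r) (g.getD (keyOf r) [] ++ [r]), nw) = _
          simp [PySem.Dict.getD_eq_get?_getD, hg]
        rw [hA, hB]
        have : (PySem.Dict.mk (g.items.map pvSel)).insert (keyOf r) r
            = PySem.Dict.mk ((g.insert (keyOf r) [r]).items.map pvSel) := by
          have := insert_mk_map g (keyOf r) [r]
          simpa [pyMaxByCount] using this
        rw [this]
        exact ih _ nw (PySem.Dict.nodup_keys_insert _ _ _ hnd)
          (by intro p hp
              rcases (PySem.Dict.mem_items_insert _ _ _ _).mp hp with h | ⟨h, _⟩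
              · subst h; simp
              · exact hne p h)
      | some prev =>
        have hprev_ne : prev ≠ [] :=
          hne (keyOf r, prev) (PySem.Dict.mem_items_of_get?_eq_some _ hg)
        obtain ⟨ph, pt, rfl⟩ : ∃ ph pt, prev = ph :: pt := by
          cases prev with
          | nil => exact absurd rfl hprev_ne
          | cons a b => exact ⟨a, b, rfl⟩
        have hB : dedupStepB (g, nw) r = (g.insert (keyOf r) ((ph :: pt) ++ [r]), nw) := by
          simp only [dedupStepB]
          rw [if_neg hk]
          show (g.insert (keyOf r) (g.getD (keyOf r) [] ++ [r]), nw) = _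
          simp [PySem.Dict.getD_eq_get?_getD, hg]
        have hA : dedupStepA (PySem.Dict.mk (g.items.map pvSel), nw) r
            = (if countFields r > countFields (pyMaxByCount (ph :: pt))
                 then ((PySem.Dict.mk (g.items.map pvSel)).insert (keyOf r) r, nw)
                 else (PySem.Dict.mk (g.items.map pvSel), nw)) := by
          simp only [dedupStepA]
          rw [if_neg hk]
          show (match (PySem.Dict.mk (g.items.map pvSel)).get? (keyOf r) with
                | none => _ | some prev => _) = _
          rw [hget, hg]
          rfl
        rw [hA, hB]
        have hdict : (if countFields r > countFields (pyMaxByCount (ph :: pt))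
                 then ((PySem.Dict.mk (g.items.map pvSel)).insert (keyOf r) r, nw)
                 else (PySem.Dict.mk (g.items.map pvSel), nw))
            = (PySem.Dict.mk ((g.insert (keyOf r) ((ph :: pt) ++ [r])).items.map pvSel), nw) := by
          by_cases hcmp : countFields r > countFields (pyMaxByCount (ph :: pt))
          · rw [if_pos hcmp]
            have := insert_mk_map g (keyOf r) ((ph :: pt) ++ [r])
            rw [pyMax_append, if_pos hcmp] at this
            rw [this]
          · rw [if_neg hcmp]
            have := insert_mk_map_keep g hnd (keyOf r) (ph :: pt) ((ph :: pt) ++ [r]) hg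
              (by rw [pyMax_append, if_neg hcmp])
            rw [this]
        rw [hdict]
        exact ih _ nw (PySem.Dict.nodup_keys_insert _ _ _ hnd)
          (by intro p hp
              rcases (PySem.Dict.mem_items_insert _ _ _ _).mp hp with h | ⟨h, _⟩
              · subst h; simp
              · exact hne p h)

-- ===== VERDICT (by name: the statement is the Claim_ definition above) =====
theorem dedup_by_website_spec : Claim_equal_dedup_by_website := by
  intro records _
  unfold Spec_dedup_by_website dedup_by_website dedup_by_website_alt
  have h := fold_rel records PySem.Dict.empty [] (by simp [PySem.Dict.empty, PySem.Dict.keys])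
    (by intro p hp; simp [PySem.Dict.empty] at hp)
  have hstart : (PySem.Dict.mk ((PySem.Dict.empty :
      PySem.Dict String (List (List (String × Option String)))).items.map pvSel))
      = (PySem.Dict.empty : PySem.Dict String (List (String × Option String))) := rfl
  rw [hstart] at h
  rw [h]
  simp [PySem.Dict.values, pvSel, List.map_map]
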